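-- pv_equiv track=rewrite | github.com/asu-gkg/htsim-rs | workload_gen/workload_gen/workload.py | build_rank_map
-- ===== SOURCE A (Python) =====
-- from typing import List
--
-- def rank_for(dp_idx: int, pp_idx: int, tp_idx: int, dp_degree: int, pp_degree: int, tp_degree: int) -> int:
--     return (dp_idx * pp_degree + pp_idx) * tp_degree + tp_idx
--
-- def build_rank_map(dp_degree: int, pp_degree: int, tp_degree: int) -> List[dict]:
--     ranks = []
--     for dp_idx in range(dp_degree):
--         for pp_idx in range(pp_degree):
--             for tp_idx in range(tp_degree):
--                 rank = rank_for(dp_idx, pp_idx, tp_idx, dp_degree, pp_degree, tp_degree)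
--                 ranks.append({"id": rank, "dp": dp_idx, "pp": pp_idx, "tp": tp_idx})
--     return ranks
-- ===== SOURCE B (Python) =====
-- def build_rank_map(dp_degree, pp_degree, tp_degree):
--     def product(dims):
--         if not dims:
--             return [()]
--         first, rest = dims[0], dims[1:]
--         return [(i,) + tail for i in range(first) for tail in product(rest)]
--
--     return [{"id": rank, "dp": dp, "pp": pp, "tp": tp}
--             for rank, (dp, pp, tp) in enumerate(product([dp_degree, pp_degree, tp_degree]))]
-- ===== Notes on version B (the rewrite author's own statement) =====
-- stated objective: alternative
-- what changed: Replaced the three hard-coded nested loops and the rank_for arithmetic helper with a generic recursive Cartesian product over a list of dimensions, assigning each rank as its sequential position via enumerate.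
import Mathlib
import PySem

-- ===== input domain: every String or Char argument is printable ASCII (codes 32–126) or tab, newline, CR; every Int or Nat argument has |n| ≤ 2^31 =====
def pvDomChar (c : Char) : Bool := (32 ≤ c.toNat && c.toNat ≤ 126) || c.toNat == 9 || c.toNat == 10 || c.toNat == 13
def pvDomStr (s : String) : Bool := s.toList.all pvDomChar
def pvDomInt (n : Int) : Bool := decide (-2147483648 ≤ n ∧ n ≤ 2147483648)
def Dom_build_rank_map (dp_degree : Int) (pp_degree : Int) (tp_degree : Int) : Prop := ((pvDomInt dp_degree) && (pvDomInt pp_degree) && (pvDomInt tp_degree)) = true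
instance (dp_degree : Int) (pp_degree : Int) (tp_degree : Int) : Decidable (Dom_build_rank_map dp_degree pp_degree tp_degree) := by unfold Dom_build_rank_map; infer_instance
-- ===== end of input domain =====

-- B replaces the three hard-coded loops and the rank_for arithmetic by a generic
-- recursive Cartesian product over a dimension list, with ids taken from enumerate
-- (objective: alternative decomposition, same cost).


-- ===== PORT A =====
def rank_for (dp_idx pp_idx tp_idx dp_degree pp_degree tp_degree : Int) : Int :=
  (dp_idx * pp_degree + pp_idx) * tp_degree + tp_idx

def build_rank_map (dp_degree : Int) (pp_degree : Int) (tp_degree : Int) : List (List (String × Int)) :=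
  (PySem.List.pyRange 0 dp_degree 1).foldl (fun ranks dp_idx =>
    (PySem.List.pyRange 0 pp_degree 1).foldl (fun ranks pp_idx =>
      (PySem.List.pyRange 0 tp_degree 1).foldl (fun ranks tp_idx =>
        ranks ++ [[("id", rank_for dp_idx pp_idx tp_idx dp_degree pp_degree tp_degree),
                   ("dp", dp_idx), ("pp", pp_idx), ("tp", tp_idx)]]) ranks) ranks) []

-- ===== PORT B =====
-- recursive Cartesian product over a list of dimensions (Source B's inner `product`)
def pvProduct : List Int → List (List Int)
  | [] => [[]]
  | first :: rest =>
      (PySem.List.pyRange 0 first 1).flatMap (fun i => (pvProduct rest).map (fun tail => i :: tail))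

def build_rank_map_alt (dp_degree : Int) (pp_degree : Int) (tp_degree : Int) : List (List (String × Int)) :=
  (PySem.List.enumerate (pvProduct [dp_degree, pp_degree, tp_degree]) 0).map (fun rc =>
    match rc with
    | (rank, [dp, pp, tp]) => [("id", rank), ("dp", dp), ("pp", pp), ("tp", tp)]
    | _ => [])  -- unreachable: every element of pvProduct over three dims has length 3

-- ===== PRECONDITION & SPEC =====
def Spec_build_rank_map (dp_degree : Int) (pp_degree : Int) (tp_degree : Int) (out : List (List (String × Int))) : Prop := out = build_rank_map_alt dp_degree pp_degree tp_degree
instance (dp_degree : Int) (pp_degree : Int) (tp_degree : Int) (out : List (List (String × Int))) : Decidable (Spec_build_rank_map dp_degree pp_degree tp_degree out) := by unfold Spec_build_rank_map; infer_instance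

-- ===== CLAIM (what is proved, stated in full; the proofs are below) =====
def Claim_equal_build_rank_map : Prop := ∀ (dp_degree : Int) (pp_degree : Int) (tp_degree : Int), Dom_build_rank_map dp_degree pp_degree tp_degree → Spec_build_rank_map dp_degree pp_degree tp_degree (build_rank_map dp_degree pp_degree tp_degree)

-- ===== LEMMAS AND PROOFS =====

-- appending one element per iteration is a flatMap
theorem pv_foldl_push {α β : Type} (l : List α) (g : α → List β) (acc : List β) :
    l.foldl (fun a x => a ++ g x) acc = acc ++ l.flatMap g := by
  induction l generalizing acc with
  | nil => simp
  | cons x xs ih => simp [List.foldl_cons, ih, List.append_assoc]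

theorem pv_flatMap_congr {α β : Type} (l : List α) (f g : α → List β)
    (h : ∀ x ∈ l, f x = g x) : l.flatMap f = l.flatMap g := by
  induction l with
  | nil => rfl
  | cons x xs ih =>
      simp only [List.flatMap_cons, h x (List.mem_cons_self), ih (fun y hy => h y (List.mem_cons_of_mem x hy))]

theorem pv_flatMap_sing {α β : Type} (l : List α) (f : α → β) :
    l.flatMap (fun x => [f x]) = l.map f := by
  induction l with
  | nil => rfl
  | cons x xs ih => simp [List.flatMap_cons, ih]

theorem pv_flatMap_const_nil {α β : Type} (l : List α) :
    l.flatMap (fun _ => ([] : List β)) = [] := by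
  induction l with
  | nil => rfl
  | cons x xs ih => simp [List.flatMap_cons, ih]

-- enumerating a mapped range pairs each element with start + its position
theorem pv_enum_map_range {α : Type} (T : Nat) (f : Nat → α) (s : Int) :
    PySem.List.enumerate ((List.range T).map f) s
      = (List.range T).map (fun (c : Nat) => (s + (c : Int), f c)) := by
  induction T generalizing s with
  | zero => simp [PySem.List.enumerate_nil]
  | succ T ih =>
      rw [List.range_succ, List.map_append, PySem.List.enumerate_append, ih]
      simp [PySem.List.enumerate_cons, PySem.List.enumerate_nil]

-- enumerating a flatMap of equal-length chunks enumerates each chunk at its offset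
theorem pv_enum_flatMap_range {α : Type} (P L : Nat) (f : Nat → List α)
    (hf : ∀ b, (f b).length = L) (s : Int) :
    PySem.List.enumerate ((List.range P).flatMap f) s
      = (List.range P).flatMap (fun (b : Nat) => PySem.List.enumerate (f b) (s + ((b * L : Nat) : Int))) := by
  induction P generalizing s with
  | zero => simp [PySem.List.enumerate_nil]
  | succ P ih =>
      rw [List.range_succ, List.flatMap_append, PySem.List.enumerate_append, ih]
      have hlen : ((List.range P).flatMap f).length = P * L := by
        simp [List.length_flatMap, hf]
      simp [hlen]

-- the key equality for nonnegative degrees D, P, T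
theorem pv_key (D P T : Nat) :
    (List.range D).flatMap (fun (i : Nat) => (List.range P).flatMap (fun (j : Nat) => (List.range T).map (fun (k : Nat) =>
        [("id", ((i : Int) * (P : Int) + (j : Int)) * (T : Int) + (k : Int)),
         ("dp", (i : Int)), ("pp", (j : Int)), ("tp", (k : Int))])))
    = (PySem.List.enumerate
        ((List.range D).flatMap (fun (i : Nat) => (List.range P).flatMap (fun (j : Nat) => (List.range T).map (fun (k : Nat) =>
          [(i : Int), (j : Int), (k : Int)])))) 0).map (fun rc =>
        match rc with
        | (rank, [dp, pp, tp]) => [("id", rank), ("dp", dp), ("pp", pp), ("tp", tp)]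
        | _ => []) := by
  rw [pv_enum_flatMap_range D (P * T) _ (fun i => by simp [List.length_flatMap]) 0]
  rw [List.map_flatMap]
  refine (pv_flatMap_congr _ _ _ (fun i _ => ?_)).symm
  rw [pv_enum_flatMap_range P T _ (fun j => by simp) _]
  rw [List.map_flatMap]
  refine (pv_flatMap_congr _ _ _ (fun j _ => ?_)).symm
  rw [pv_enum_map_range, List.map_map]
  refine (List.map_congr_left (fun k _ => ?_)).symm
  show [("id", (0 : Int) + ((i * (P * T) : Nat) : Int) + ((j * T : Nat) : Int) + (k : Int)),
        ("dp", (i : Int)), ("pp", (j : Int)), ("tp", (k : Int))]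
      = [("id", ((i : Int) * (P : Int) + (j : Int)) * (T : Int) + (k : Int)),
         ("dp", (i : Int)), ("pp", (j : Int)), ("tp", (k : Int))]
  congr 3
  push_cast
  ring

-- ===== VERDICT (by name: the statement is the Claim_ definition above) =====
theorem build_rank_map_spec : Claim_equal_build_rank_map := by
  intro dp pp tp _
  unfold Spec_build_rank_map build_rank_map build_rank_map_alt rank_for
  simp only [pvProduct]
  by_cases hdp : dp ≤ 0
  · simp [PySem.List.pyRange_one_eq_nil hdp, PySem.List.enumerate_nil]
  by_cases hpp : pp ≤ 0
  · simp [PySem.List.pyRange_one_eq_nil hpp, pv_flatMap_const_nil, PySem.List.enumerate_nil]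
  by_cases htp : tp ≤ 0
  · simp [PySem.List.pyRange_one_eq_nil htp, pv_flatMap_const_nil, PySem.List.enumerate_nil]
  · rw [not_le] at hdp hpp htp
    obtain ⟨D, hD⟩ : ∃ D : Nat, dp = (D : Int) := ⟨dp.toNat, (Int.toNat_of_nonneg hdp.le).symm⟩
    obtain ⟨P, hP⟩ : ∃ P : Nat, pp = (P : Int) := ⟨pp.toNat, (Int.toNat_of_nonneg hpp.le).symm⟩
    obtain ⟨T, hT⟩ : ∃ T : Nat, tp = (T : Int) := ⟨tp.toNat, (Int.toNat_of_nonneg htp.le).symm⟩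
    subst hD hP hT
    simp only [pv_foldl_push, List.nil_append, List.map, pv_flatMap_sing,
      PySem.List.pyRange_zero_nat, List.foldl_map, List.flatMap_map, List.map_map,
      List.map_flatMap, Function.comp_def]
    exact pv_key D P T
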